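-- pv_equiv track=rewrite | github.com/EsriDE/EsriDE-python-osm2arcgis | osm_runner.py | detect_rings
-- ===== SOURCE A (Python) =====
-- def detect_rings(lst):
--     '''
--     Function to identify polygon rings in a ring-ordered geometry list, returns the identified rings containing geometries.
--     @param lst: A list with ring-ordered geometries.
--     '''
--     ringlist = []
--     start = 0
--     end = -1
--     for e in range(len(lst)):
--         if lst[e] == lst[start] and e > start:
--             end = e
--             ringlist.append(lst[start:end+1])
--             start = e+1
--     return ringlist
-- ===== SOURCE B (Python) =====
-- def detect_rings(lst):
--     """Accumulator-based re-implementation: grow a `current` ring buffer and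
--     emit it whenever the incoming element closes it (equals its first element);
--     an unclosed trailing buffer is discarded."""
--     rings = []
--     current = []
--     for x in lst:
--         if not current:
--             current = [x]
--         else:
--             current.append(x)
--             if x == current[0]:
--                 rings.append(current)
--                 current = []
--     return rings
-- ===== Notes on version B (the rewrite author's own statement) =====
-- stated objective: simpler
-- what changed: Replaced index bookkeeping (start pointer, slicing lst[start:end+1] with repeated random-access indexing) by a single pass over the elements that grows an explicit `current` ring buffer and emits it when the closing element arrives.
import Mathlib
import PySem

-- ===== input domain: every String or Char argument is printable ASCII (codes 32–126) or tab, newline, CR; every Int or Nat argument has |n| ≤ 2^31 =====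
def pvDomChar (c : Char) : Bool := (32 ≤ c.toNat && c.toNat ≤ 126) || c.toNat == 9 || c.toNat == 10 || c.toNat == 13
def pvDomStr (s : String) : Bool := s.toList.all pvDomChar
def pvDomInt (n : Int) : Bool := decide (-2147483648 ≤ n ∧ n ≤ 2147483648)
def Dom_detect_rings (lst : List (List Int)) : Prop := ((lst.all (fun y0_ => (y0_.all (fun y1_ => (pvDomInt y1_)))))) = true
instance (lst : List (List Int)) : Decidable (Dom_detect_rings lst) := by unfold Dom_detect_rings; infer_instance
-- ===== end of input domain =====

-- B replaces A's start-index/slice bookkeeping with a running `current` ring buffer (simpler, same cost).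

-- ===== PORT A =====
-- loop body of A: state = (ringlist, start); 'end' is write-only in A (only used inside the branch that sets it), so it is not part of the state
def detectRingsStepA (lst : List (List Int)) (st : List (List (List Int)) × Int) (e : Int) :
    List (List (List Int)) × Int :=
  if PySem.List.pyGetD lst e [] = PySem.List.pyGetD lst st.2 [] ∧ st.2 < e then
    (st.1 ++ [PySem.List.slice lst (some st.2) (some (e + 1))], e + 1)
  else st

def detect_rings (lst : List (List Int)) : List (List (List Int)) :=
  ((PySem.List.pyRange 0 (lst.length : Int) 1).foldl (detectRingsStepA lst) ([], 0)).1

-- ===== PORT B =====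
-- loop body of B: state = (rings, current)
def detectRingsStepB (st : List (List (List Int)) × List (List Int)) (x : List Int) :
    List (List (List Int)) × List (List Int) :=
  match st.2 with
  | [] => (st.1, [x])
  | c0 :: _ =>
      if x = c0 then (st.1 ++ [st.2 ++ [x]], []) else (st.1, st.2 ++ [x])

def detect_rings_alt (lst : List (List Int)) : List (List (List Int)) :=
  (lst.foldl detectRingsStepB ([], [])).1

-- ===== PRECONDITION & SPEC =====
def Spec_detect_rings (lst : List (List Int)) (out : List (List (List Int))) : Prop := out = detect_rings_alt lst
instance (lst : List (List Int)) (out : List (List (List Int))) : Decidable (Spec_detect_rings lst out) := by unfold Spec_detect_rings; infer_instance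

-- ===== CLAIM (what is proved, stated in full; the proofs are below) =====
def Claim_equal_detect_rings : Prop := ∀ (lst : List (List Int)), Dom_detect_rings lst → Spec_detect_rings lst (detect_rings lst)

-- ===== LEMMAS AND PROOFS =====

-- Invariant: after processing the first n indices (A) / elements (B), both folds carry the
-- same emitted rings, A's start pointer is some s ≤ n, and B's buffer is exactly lst[s:n].
theorem detect_rings_invariant (lst : List (List Int)) :
    ∀ n, n ≤ lst.length →
      ∃ (R : List (List (List Int))) (s : Nat), s ≤ n ∧
        (PySem.List.pyRange 0 (n : Int) 1).foldl (detectRingsStepA lst) ([], 0) = (R, (s : Int)) ∧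
        (lst.take n).foldl detectRingsStepB ([], []) = (R, (lst.drop s).take (n - s)) := by
  intro n
  induction n with
  | zero => intro _; exact ⟨[], 0, le_refl _, by simp [PySem.List.pyRange_one_eq_nil], by simp⟩
  | succ n ih =>
    intro hn
    have hlt : n < lst.length := hn
    obtain ⟨R, s, hs, hA, hB⟩ := ih (Nat.le_of_lt hlt)
    have hrange : PySem.List.pyRange 0 ((n + 1 : Nat) : Int) 1
        = PySem.List.pyRange 0 (n : Int) 1 ++ [(n : Int)] := by
      push_cast
      exact PySem.List.pyRange_one_succ_right (by positivity)
    have htake : lst.take (n + 1) = lst.take n ++ [lst[n]] := by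
      rw [List.take_add_one]
      simp [List.getElem?_eq_getElem hlt]
    have hgetn : PySem.List.pyGetD lst ((n : Int)) [] = lst[n] := by
      rw [PySem.List.pyGetD_natCast]
      simp [List.getD, List.getElem?_eq_getElem hlt]
    rw [hrange, List.foldl_append, hA, htake, List.foldl_append, hB]
    by_cases hsn : s = n
    · -- buffer empty, index equals start: A does nothing, B starts a new buffer
      subst hsn
      refine ⟨R, s, Nat.le_succ _, ?_, ?_⟩
      · simp only [List.foldl_cons, List.foldl_nil, detectRingsStepA]
        rw [if_neg (by simp)]
      · rw [Nat.sub_self, List.take_zero]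
        simp only [List.foldl_cons, List.foldl_nil, detectRingsStepB]
        have h1 : s + 1 - s = 1 := by omega
        rw [h1, List.drop_eq_getElem_cons hlt, List.take_succ_cons, List.take_zero]
    · have hslt : s < n := lt_of_le_of_ne hs hsn
      have hsl : s < lst.length := lt_trans hslt hlt
      have hdrop : lst.drop s = lst[s] :: lst.drop (s + 1) := List.drop_eq_getElem_cons hsl
      have hcur : (lst.drop s).take (n - s)
          = lst[s] :: (lst.drop (s + 1)).take (n - s - 1) := by
        rw [hdrop]
        obtain ⟨k, hk⟩ : ∃ k, n - s = k + 1 := ⟨n - s - 1, by omega⟩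
        rw [hk, List.take_succ_cons]
        norm_num
      have hgets : PySem.List.pyGetD lst ((s : Int)) [] = lst[s] := by
        rw [PySem.List.pyGetD_natCast]
        simp [List.getD, List.getElem?_eq_getElem hsl]
      have hext : (lst.drop s).take (n - s) ++ [lst[n]] = (lst.drop s).take (n + 1 - s) := by
        have hlen : n - s < (lst.drop s).length := by
          rw [List.length_drop]; omega
        have h1 : n + 1 - s = (n - s) + 1 := by omega
        rw [h1, List.take_add_one, List.getElem?_eq_getElem hlen]
        simp
        congr 1
        omega
      by_cases heq : lst[n] = lst[s]
      · -- closing element: A slices lst[s:n+1], B emits current ++ [lst[n]]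
        refine ⟨R ++ [(lst.drop s).take (n + 1 - s)], n + 1, le_refl _, ?_, ?_⟩
        · simp only [List.foldl_cons, List.foldl_nil, detectRingsStepA, hgetn, hgets]
          rw [if_pos ⟨heq, by exact_mod_cast hslt⟩]
          have hslice : PySem.List.slice lst (some (s : Int)) (some ((n : Int) + 1))
              = (lst.drop s).take (n + 1 - s) := by
            have h2 : ((n : Int) + 1) = ((n + 1 : Nat) : Int) := by push_cast; ring
            rw [h2, PySem.List.slice_natCast]
          rw [hslice]
          norm_num
        · rw [hcur]
          simp only [List.foldl_cons, List.foldl_nil, detectRingsStepB]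
          rw [if_pos heq]
          rw [← hcur, hext]
          simp
      · -- not closing: A keeps start, B just extends the buffer
        refine ⟨R, s, by omega, ?_, ?_⟩
        · simp only [List.foldl_cons, List.foldl_nil, detectRingsStepA, hgetn, hgets]
          rw [if_neg (by exact fun h => heq h.1)]
        · rw [hcur]
          simp only [List.foldl_cons, List.foldl_nil, detectRingsStepB]
          rw [if_neg heq]
          rw [← hcur, hext]

-- ===== VERDICT (by name: the statement is the Claim_ definition above) =====
theorem detect_rings_spec : Claim_equal_detect_rings := by
  intro lst _
  unfold Spec_detect_rings detect_rings detect_rings_alt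
  obtain ⟨R, s, _, hA, hB⟩ := detect_rings_invariant lst lst.length (le_refl _)
  rw [List.take_length] at hB
  rw [hA, hB]
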